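-- pv_equiv track=rewrite | github.com/JayZhu03/agent-learning | src/agent.py | _do_extract_string_arg
-- ===== SOURCE A (Python) =====
-- def _do_extract_string_arg(s: str, normalize_path: bool = False) -> str:
--     """实际提取逻辑"""
--     s = s.strip()
--
--     # 如果以引号开始
--     if s.startswith('"') or s.startswith("'"):
--         quote = s[0]
--         # 找到匹配的结束引号
--         for i in range(1, len(s)):
--             if s[i] == quote and (i == 0 or s[i-1] != '\\'):
--                 result = s[1:i]
--                 if normalize_path:
--                     result = result.replace('\\', '/')
--                 return result
--         # 没找到结束引号，返回去掉首引号的内容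
--         result = s[1:]
--         if normalize_path:
--             result = result.replace('\\', '/')
--         return result
--
--     # 没有引号，返回整个字符串
--     if normalize_path:
--         s = s.replace('\\', '/')
--     return s
-- ===== SOURCE B (Python) =====
-- def _join_until_unescaped(q, parts):
--     """Glue the split pieces back together up to (not including) the first
--     boundary whose piece does not end in a backslash; if every boundary is
--     escaped, glue everything back (no closing quote)."""
--     if len(parts) == 1:
--         return parts[0]
--     p = parts[0]
--     if p.endswith('\\'):
--         return p + q + _join_until_unescaped(q, parts[1:])
--     return p
--
--
-- def _do_extract_string_arg(s: str, normalize_path: bool = False) -> str: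
--     """Split the body on the quote character and rejoin the pieces across
--     escaped boundaries, instead of scanning character positions."""
--     s = s.strip()
--     if s[:1] in ('"', "'"):
--         q = s[0]
--         out = _join_until_unescaped(q, s[1:].split(q))
--     else:
--         out = s
--     return out.replace('\\', '/') if normalize_path else out
-- ===== Notes on version B (the rewrite author's own statement) =====
-- stated objective: alternative
-- what changed: Replaces A's index-by-index scan for the first unescaped closing quote with a split-and-rejoin strategy: B splits the body on the quote character once and recursively glues pieces back across boundaries whose piece ends in a backslash, so no character positions are ever inspected.
import Mathlib
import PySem

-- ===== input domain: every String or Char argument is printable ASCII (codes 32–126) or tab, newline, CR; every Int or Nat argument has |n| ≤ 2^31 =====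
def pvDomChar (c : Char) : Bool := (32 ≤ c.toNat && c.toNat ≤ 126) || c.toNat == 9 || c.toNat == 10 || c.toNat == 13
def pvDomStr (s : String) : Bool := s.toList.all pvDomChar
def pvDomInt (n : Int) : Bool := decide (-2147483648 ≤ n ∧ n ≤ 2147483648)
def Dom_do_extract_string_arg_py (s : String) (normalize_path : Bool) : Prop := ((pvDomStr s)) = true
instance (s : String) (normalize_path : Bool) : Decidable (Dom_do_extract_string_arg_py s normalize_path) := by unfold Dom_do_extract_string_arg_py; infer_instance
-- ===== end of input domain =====

-- B replaces A's index-by-index scan for the first unescaped closing quote by one split on the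
-- quote character followed by a recursive rejoin across escaped boundaries; same return value.

-- ===== PORT A =====
def do_extract_string_arg_py (s : String) (normalize_path : Bool) : String :=
  let cs := PySem.Chars.strip s.toList
  if PySem.Chars.startswith cs ['"'] || PySem.Chars.startswith cs ['\''] then
    let quote := cs.headI
    -- for i in range(1, len(s)): first i with s[i] == quote and (i == 0 or s[i-1] != '\\')
    match (PySem.List.pyRange 1 (cs.length : Int) 1).foldl
        (fun acc i =>
          match acc with
          | some _ => acc
          | none =>
            if PySem.List.pyGetD cs i ' ' = quote ∧
                (i = 0 ∨ PySem.List.pyGetD cs (i - 1) ' ' ≠ '\\') then some i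
            else none) none with
    | some i =>
        let result := PySem.List.slice cs (some 1) (some i)
        String.ofList (if normalize_path then PySem.Chars.replace result ['\\'] ['/'] else result)
    | none =>
        let result := PySem.List.slice cs (some 1) none
        String.ofList (if normalize_path then PySem.Chars.replace result ['\\'] ['/'] else result)
  else
    String.ofList (if normalize_path then PySem.Chars.replace cs ['\\'] ['/'] else cs)

-- ===== PORT B =====
-- _join_until_unescaped(q, parts): glue split pieces back together up to (not including) the
-- first boundary whose piece does not end in a backslash; if every boundary is escaped, glue all.
def pvJoinUntil (q : Char) : List (List Char) → List Char
  | [] => []                 -- unreachable: str.split always returns a nonempty list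
  | [p] => p
  | p :: rest =>
      if PySem.Chars.endswith p ['\\'] then p ++ q :: pvJoinUntil q rest else p

def do_extract_string_arg_py_alt (s : String) (normalize_path : Bool) : String :=
  let cs := PySem.Chars.strip s.toList
  let out :=
    if PySem.List.slice cs none (some 1) = ['"'] ∨ PySem.List.slice cs none (some 1) = ['\''] then
      let q := cs.headI
      pvJoinUntil q (PySem.Chars.splitOn (PySem.List.slice cs (some 1) none) [q])
    else cs
  String.ofList (if normalize_path then PySem.Chars.replace out ['\\'] ['/'] else out)

-- ===== PRECONDITION & SPEC =====
def Spec_do_extract_string_arg_py (s : String) (normalize_path : Bool) (out : String) : Prop := out = do_extract_string_arg_py_alt s normalize_path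
instance (s : String) (normalize_path : Bool) (out : String) : Decidable (Spec_do_extract_string_arg_py s normalize_path out) := by unfold Spec_do_extract_string_arg_py; infer_instance

-- ===== CLAIM =====
def Claim_equal_do_extract_string_arg_py : Prop := ∀ (s : String) (normalize_path : Bool), Dom_do_extract_string_arg_py s normalize_path → Spec_do_extract_string_arg_py s normalize_path (do_extract_string_arg_py s normalize_path)

-- ===== LEMMAS AND PROOFS =====

-- the condition A tests at (actual) index 1 + k
def pvCond (cs : List Char) (q : Char) (i : Nat) : Bool :=
  decide (cs.getD i ' ' = q ∧ cs.getD (i - 1) ' ' ≠ '\\')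

-- first k with condition at index 1+k (the value A's loop finds, shifted by one)
def pvFirst (cs : List Char) (q : Char) : Option Nat :=
  (List.range (cs.length - 1)).find? (fun k => pvCond cs q (1 + k))

lemma pvFoldl_some (c : Int → Prop) [DecidablePred c] (l : List Int) (j : Int) :
    l.foldl (fun acc i => match acc with
      | some _ => acc
      | none => if c i then some i else none) (some j) = some j := by
  induction l with
  | nil => rfl
  | cons a t ih => simpa using ih

lemma pvFoldl_find (c : Int → Prop) [DecidablePred c] (l : List Int) :
    l.foldl (fun acc i => match acc with
      | some _ => acc
      | none => if c i then some i else none) none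
      = l.find? (fun i => decide (c i)) := by
  induction l with
  | nil => rfl
  | cons a t ih =>
    by_cases h : c a
    · simp [List.foldl_cons, List.find?, h, pvFoldl_some]
    · simpa [List.foldl_cons, List.find?, h] using ih

lemma pvPyRange_one (n : Nat) :
    PySem.List.pyRange 1 (n : Int) 1 = (List.range (n - 1)).map (fun k : Nat => (1 : Int) + (k : Int)) := by
  unfold PySem.List.pyRange
  by_cases h : (1 : Int) < n
  · have h1 : ((n : Int) - 1 + 1 - 1) / 1 = ((n - 1 : Nat) : Int) := by omega
    simp only [if_neg (by norm_num : ¬ (1:Int) = 0), if_pos (by norm_num : (0:Int) < 1), if_pos h, h1]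
    simp [Int.toNat_natCast]
  · have hn : n - 1 = 0 := by omega
    simp [h, hn]

lemma pvStartswith_single (cs : List Char) (c : Char) :
    (PySem.Chars.startswith cs [c] = true) ↔ cs.take 1 = [c] := by
  cases cs with
  | nil => simp [PySem.Chars.startswith, List.isPrefixOf]
  | cons b t =>
    unfold PySem.Chars.startswith
    rw [List.isPrefixOf_iff_prefix]
    simp [List.cons_prefix_cons, eq_comm]

-- A's loop result, rewritten through pvFirst
lemma pvA_loop_eq (cs : List Char) (q : Char) :
    (PySem.List.pyRange 1 (cs.length : Int) 1).foldl
        (fun acc i =>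
          match acc with
          | some _ => acc
          | none =>
            if PySem.List.pyGetD cs i ' ' = q ∧
                (i = 0 ∨ PySem.List.pyGetD cs (i - 1) ' ' ≠ '\\') then some i
            else none) none
      = (pvFirst cs q).map (fun k : Nat => (1 : Int) + (k : Int)) := by
  have hfun : ((fun i => decide (PySem.List.pyGetD cs i ' ' = q ∧
        (i = 0 ∨ PySem.List.pyGetD cs (i - 1) ' ' ≠ '\\'))) ∘ (fun k : Nat => (1 : Int) + (k : Int)))
      = fun k => pvCond cs q (1 + k) := by
    funext k
    have e1 : (1 : Int) + (k : Int) = ((1 + k : Nat) : Int) := by omega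
    have e3 : (1 + k) - 1 = k := by omega
    simp only [Function.comp, e1, PySem.List.pyGetD_natCast, pvCond, e3]
    have h4 : ¬ ((1 : Int) + (k : Int) = 0) := by omega
    simp [h4]
  rw [pvFoldl_find, pvPyRange_one, List.find?_map, hfun]
  rfl

-- ---- B side: splitOn characterisation and the rejoin lemma ----

-- structural recursion computing str.split(q) for a one-character separator
def pvMySplit (q : Char) : List Char → List (List Char)
  | [] => [[]]
  | c :: t => if c = q then [] :: pvMySplit q t else (pvMySplit q t).modifyHead (c :: ·)

lemma pvMySplit_ne_nil (q : Char) (t : List Char) : pvMySplit q t ≠ [] := by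
  induction t with
  | nil => simp [pvMySplit]
  | cons c t ih =>
    by_cases h : c = q
    · simp [pvMySplit, h]
    · simp only [pvMySplit, if_neg h]
      cases hm : pvMySplit q t with
      | nil => exact absurd hm ih
      | cons a l => simp

lemma pvGo_spec (q : Char) : ∀ (fuel : Nat) (l cur : List Char) (acc : List (List Char)),
    l.length ≤ fuel →
    PySem.Chars.splitOn.go [q] fuel l cur acc
      = acc.reverse ++ (pvMySplit q l).modifyHead (cur.reverse ++ ·) := by
  intro fuel
  induction fuel with
  | zero =>
    intro l cur acc hl
    have : l = [] := by cases l <;> simp_all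
    subst this
    simp [PySem.Chars.splitOn.go, pvMySplit]
  | succ fuel ih =>
    intro l cur acc hl
    cases l with
    | nil => simp [PySem.Chars.splitOn.go, pvMySplit]
    | cons c rest =>
      rw [PySem.Chars.splitOn.go]
      by_cases hc : c = q
      · have hpre : [q].isPrefixOf (c :: rest) = true := by simp [List.isPrefixOf, hc]
        rw [if_pos hpre]
        have hih := ih rest [] (cur.reverse :: acc) (by simpa using Nat.le_of_succ_le_succ hl)
        rw [show List.drop [q].length (c :: rest) = rest by simp]
        rw [hih]
        cases hmr : pvMySplit q rest with
        | nil => exact absurd hmr (pvMySplit_ne_nil q rest)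
        | cons h t => simp [pvMySplit, hc, hmr]
      · have hpre : [q].isPrefixOf (c :: rest) = false := by
          simp [List.isPrefixOf]
          exact fun h => absurd h.symm hc
        rw [if_neg (by simp [hpre])]
        rw [ih rest (c :: cur) acc (by simpa using Nat.le_of_succ_le_succ hl)]
        cases hmr : pvMySplit q rest with
        | nil => exact absurd hmr (pvMySplit_ne_nil q rest)
        | cons h t => simp [pvMySplit, hc, hmr]

lemma pvSplitOn_eq (q : Char) (l : List Char) :
    PySem.Chars.splitOn l [q] = pvMySplit q l := by
  unfold PySem.Chars.splitOn
  rw [pvGo_spec q (l.length + 1) l [] [] (by omega)]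
  cases hmr : pvMySplit q l with
  | nil => exact absurd hmr (pvMySplit_ne_nil q l)
  | cons h t => simp

-- the condition B's rejoin effectively tests at body index k, with pending piece cur
def pvC (q : Char) (cur t : List Char) : Nat → Bool
  | 0 => decide (t.getD 0 ' ' = q ∧ cur.getLast? ≠ some '\\')
  | (k+1) => decide (t.getD (k+1) ' ' = q ∧ t.getD k ' ' ≠ '\\')

def pvF (q : Char) (cur t : List Char) : Option Nat :=
  (List.range t.length).find? (pvC q cur t)

lemma pvC_shift (q c : Char) (cur t : List Char) (k : Nat) :
    pvC q cur (c :: t) (k + 1) = pvC q (cur ++ [c]) t k := by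
  cases k with
  | zero => simp [pvC]
  | succ j => simp [pvC]

lemma pvC_qlast (q : Char) (hq : q ≠ '\\') (cur t : List Char) :
    pvC q (cur ++ [q]) t = pvC q [] t := by
  funext k
  cases k with
  | zero => simp [pvC, hq]
  | succ j => simp [pvC]

lemma pvF_cons (q c : Char) (cur t : List Char) :
    pvF q cur (c :: t)
      = if pvC q cur (c :: t) 0 then some 0 else (pvF q (cur ++ [c]) t).map (· + 1) := by
  unfold pvF
  rw [show (c :: t).length = t.length + 1 from rfl, List.range_succ_eq_map]
  by_cases h : pvC q cur (c :: t) 0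
  · simp [List.find?, h]
  · simp only [List.find?_cons, h, Bool.false_eq_true, if_false]
    rw [List.find?_map]
    have : (pvC q cur (c :: t)) ∘ Nat.succ = pvC q (cur ++ [c]) t := by
      funext k
      simp [Function.comp, Nat.succ_eq_add_one, pvC_shift]
    rw [this]

lemma pvEndswith_getLast (cur : List Char) :
    (PySem.Chars.endswith cur ['\\'] = true) ↔ cur.getLast? = some '\\' := by
  rw [PySem.Chars.endswith_iff]
  constructor
  · rintro ⟨t, rfl⟩; simp
  · intro h
    rcases List.getLast?_eq_some_iff.mp h with ⟨l, rfl⟩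
    exact ⟨l, rfl⟩

lemma pvModifyHead_id (l : List (List Char)) : l.modifyHead (fun x : List Char => x) = l := by
  cases l <;> simp

lemma pvF_qlast (q : Char) (hq : q ≠ '\\') (cur t : List Char) :
    pvF q (cur ++ [q]) t = pvF q [] t := by
  unfold pvF
  rw [pvC_qlast _ hq]

-- main rejoin lemma: gluing the split of t back (with pending piece cur) stops exactly at the
-- first unescaped quote of t
lemma pvJoin_spec (q : Char) (hq : q ≠ '\\') : ∀ (t cur : List Char),
    pvJoinUntil q ((pvMySplit q t).modifyHead (cur ++ ·))
      = match pvF q cur t with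
        | some k => cur ++ t.take k
        | none => cur ++ t := by
  intro t
  induction t with
  | nil =>
    intro cur
    simp [pvMySplit, pvJoinUntil, pvF]
  | cons c t ih =>
    intro cur
    by_cases hc : c = q
    · subst hc
      simp only [pvMySplit, if_true, List.modifyHead_cons,
        List.append_nil]
      rw [pvF_cons, pvF_qlast _ hq]
      by_cases hend : cur.getLast? = some '\\'
      · -- boundary escaped: glue across and recurse
        have h0 : pvC c cur (c :: t) 0 = false := by
          simp [pvC, hend]
        rw [if_neg (by simp [h0])]
        cases hmr : pvMySplit c t with
        | nil => exact absurd hmr (pvMySplit_ne_nil c t)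
        | cons h2 t2 =>
          have hJ : pvJoinUntil c (cur :: h2 :: t2)
              = cur ++ c :: pvJoinUntil c (h2 :: t2) := by
            simp only [pvJoinUntil]
            rw [if_pos (pvEndswith_getLast cur |>.mpr hend)]
          rw [hJ]
          have hrec := ih []
          rw [hmr] at hrec
          simp only [List.nil_append, pvModifyHead_id] at hrec
          rw [hrec]
          cases pvF c [] t with
          | none => simp
          | some k => simp
      · have h0 : pvC c cur (c :: t) 0 = true := by
          simp [pvC, hend]
        rw [if_pos h0]
        cases hmr : pvMySplit c t with
        | nil => exact absurd hmr (pvMySplit_ne_nil c t)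
        | cons h2 t2 =>
          simp only [pvJoinUntil]
          rw [if_neg (fun hcon => hend ((pvEndswith_getLast cur).mp hcon))]
          simp
    · simp only [pvMySplit, if_neg hc]
      rw [List.modifyHead_modifyHead]
      have hcomp : ((cur ++ ·) ∘ (c :: ·)) = ((cur ++ [c]) ++ ·) := by
        funext x; simp
      rw [hcomp, ih (cur ++ [c]), pvF_cons]
      have h0 : pvC q cur (c :: t) 0 = false := by
        simp [pvC, hc]
      rw [if_neg (by simp [h0])]
      cases pvF q (cur ++ [c]) t with
      | none => simp
      | some k => simp [List.take_succ_cons]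

-- linking A's first-index search to B's condition on the body
lemma pvFirst_eq_pvF (q : Char) (body : List Char) (hq : q ≠ '\\') :
    pvFirst (q :: body) q = pvF q [] body := by
  unfold pvFirst pvF
  rw [show (q :: body).length - 1 = body.length by simp]
  congr 1
  funext k
  cases k with
  | zero => simp [pvCond, pvC, hq]
  | succ j =>
    show pvCond (q :: body) q (1 + (j + 1)) = pvC q [] body (j + 1)
    rw [show 1 + (j + 1) = (j + 1) + 1 by omega]
    simp [pvCond, pvC]

-- ===== VERDICT =====
theorem do_extract_string_arg_py_spec : Claim_equal_do_extract_string_arg_py := by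
  intro s normalize_path _hdom
  unfold Spec_do_extract_string_arg_py
  simp only [do_extract_string_arg_py, do_extract_string_arg_py_alt]
  set cs := PySem.Chars.strip s.toList with hcs
  have hsl : PySem.List.slice cs none (some 1) = cs.take 1 := by
    rw [PySem.List.slice_to cs (by norm_num)]; rfl
  have hbr : (PySem.Chars.startswith cs ['"'] || PySem.Chars.startswith cs ['\'']) = true ↔
      (PySem.List.slice cs none (some 1) = ['"'] ∨ PySem.List.slice cs none (some 1) = ['\'']) := by
    rw [hsl, Bool.or_eq_true, pvStartswith_single, pvStartswith_single]
  by_cases hq : (PySem.Chars.startswith cs ['"'] || PySem.Chars.startswith cs ['\'']) = true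
  · rw [if_pos hq, if_pos (hbr.mp hq)]
    obtain ⟨a, body, hab⟩ : ∃ a body, cs = a :: body := by
      have hne : cs ≠ [] := by
        intro hnil
        rcases hbr.mp hq with h | h <;> (rw [hsl, hnil] at h; simp at h)
      exact List.exists_cons_of_ne_nil hne
    have ha : a = '"' ∨ a = '\'' := by
      have h := hbr.mp hq
      rw [hsl, hab] at h
      simpa [List.take_succ_cons] using h
    have hanb : a ≠ '\\' := by rcases ha with h | h <;> simp [h]
    rw [hab]
    have hhead : (a :: body).headI = a := rfl
    rw [hhead]
    rw [pvA_loop_eq (a :: body) a, pvFirst_eq_pvF a body hanb]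
    have hfrom : PySem.List.slice (a :: body) (some 1) none = body := by
      rw [PySem.List.slice_from_one]; rfl
    rw [hfrom, pvSplitOn_eq a body]
    have hJ := pvJoin_spec a hanb body []
    simp only [List.nil_append, pvModifyHead_id] at hJ
    rw [hJ]
    cases hf : pvF a [] body with
    | none =>
      simp only [Option.map_none]
    | some k =>
      simp only [Option.map_some]
      have hslice : PySem.List.slice (a :: body) (some 1) (some ((1 : Int) + (k : Int)))
          = body.take k := by
        rw [show (1 : Int) = ((1 : Nat) : Int) by norm_num,
          PySem.List.slice_natCast_add]
        rfl
      rw [hslice]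
  · rw [if_neg hq, if_neg (fun h => hq (hbr.mpr h))]
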